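-- pv_equiv track=rewrite | github.com/mmistroni/Codility | src/picking_numbers.py | solution
-- ===== SOURCE A (Python) =====
-- def solution(arr):
--     sorted_arr = sorted(arr, key=lambda k:k)
--     counter_holder = []
--     counter = 0
--     current_min = None
--     for idx, item in enumerate(sorted_arr):
--         if idx == 0:
--             current_min=item
--             counter +=1
--             continue
--         if item - current_min <=1:
--             counter +=1
--         else:
--             counter_holder.append(counter)
--             counter = 1
--             current_min=item
--     counter_holder.append(counter)
--     return max(counter_holder)
-- ===== SOURCE B (Python) =====
-- def _bisect_right(s, v):
--     # insertion point: first index whose value exceeds v (binary search)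
--     lo, hi = 0, len(s)
--     while lo < hi:
--         mid = (lo + hi) // 2
--         if v < s[mid]:
--             hi = mid
--         else:
--             lo = mid + 1
--     return lo
--
--
-- def solution(arr):
--     s = sorted(arr)
--     n = len(s)
--     best = 0
--     i = 0
--     while i < n:
--         j = _bisect_right(s, s[i] + 1)
--         best = max(best, j - i)
--         i = j
--     return best
-- ===== Notes on version B (the rewrite author's own statement) =====
-- stated objective: alternative
-- what changed: A counts group members one element at a time while tracking a running counter, holder list and current minimum; B walks the sorted array group by group, jumping directly to each group's end with a hand-rolled bisect_right binary search and tracking only the best group size.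
import Mathlib
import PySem

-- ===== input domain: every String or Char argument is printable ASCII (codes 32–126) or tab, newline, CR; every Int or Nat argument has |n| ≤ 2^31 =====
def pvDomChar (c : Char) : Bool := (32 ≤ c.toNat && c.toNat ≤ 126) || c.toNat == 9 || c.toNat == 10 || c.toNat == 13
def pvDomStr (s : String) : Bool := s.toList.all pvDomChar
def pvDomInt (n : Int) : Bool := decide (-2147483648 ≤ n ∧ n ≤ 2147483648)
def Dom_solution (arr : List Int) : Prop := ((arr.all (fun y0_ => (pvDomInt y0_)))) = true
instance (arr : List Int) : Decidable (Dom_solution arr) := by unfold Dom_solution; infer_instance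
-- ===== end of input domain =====

-- B replaces A's element-by-element group counter with a binary-search jump to each
-- group's end over the sorted array (alternative decomposition).

-- ===== PORT A =====
-- loop body of A's for-loop over enumerate(sorted_arr); state = (counter_holder, counter, current_min).
-- current_min is Option Int (None before idx 0); the `.getD 0` fallback is unreachable: for idx ≠ 0 it is always `some`.
def fstep (st : List Int × Int × Option Int) (p : Int × Int) : List Int × Int × Option Int :=
  if p.1 = 0 then (st.1, st.2.1 + 1, some p.2)
  else if p.2 - (st.2.2.getD 0) ≤ 1 then (st.1, st.2.1 + 1, st.2.2)
  else (st.1 ++ [st.2.1], 1, some p.2)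

def solution (arr : List Int) : Int :=
  let sorted_arr := PySem.List.sorted arr (fun k => k)
  let st := (PySem.List.enumerate sorted_arr).foldl fstep ([], 0, none)
  let counter_holder := st.1 ++ [st.2.1]
  -- max(counter_holder): the holder is nonempty, so max? is always `some`; `.getD 0` is never the fallback
  (PySem.List.max? counter_holder (fun k => k)).getD 0

-- ===== PORT B =====
-- Source B's hand-rolled _bisect_right is exactly CPython's bisect_right loop (lo/hi, mid = (lo+hi)//2),
-- which is PySem.List.bisectRight.
-- Source B's while loop over index i; fuel only makes the recursion total (s is sorted, so j > i and
-- at most s.length iterations happen; the fuel branch is never the one that stops the loop).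
def bLoop (s : List Int) (fuel : Nat) (i : Nat) (best : Int) : Int :=
  match fuel with
  | 0 => best
  | fuel + 1 =>
    if i < s.length then
      -- s[i]: 0 ≤ i < len s here, so getD's default is unreachable
      let j := PySem.List.bisectRight s (s.getD i 0 + 1)
      bLoop s fuel j (max best ((j : Int) - (i : Int)))
    else best

def solution_alt (arr : List Int) : Int :=
  let s := PySem.List.sorted arr (fun k => k)
  bLoop s s.length 0 0

-- ===== PRECONDITION & SPEC =====
def Spec_solution (arr : List Int) (out : Int) : Prop := out = solution_alt arr
instance (arr : List Int) (out : Int) : Decidable (Spec_solution arr out) := by unfold Spec_solution; infer_instance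

-- ===== CLAIM (what is proved, stated in full; the proofs are below) =====
def Claim_equal_solution : Prop := ∀ (arr : List Int), Dom_solution arr → Spec_solution arr (solution arr)

-- ===== LEMMAS AND PROOFS =====

-- the list of group sizes of x :: rest, first group already holding c elements (x its minimum)
def groupsFrom (c x : Int) (rest : List Int) : List Int :=
  match hdw : rest.dropWhile (fun a => decide (a ≤ x + 1)) with
  | [] => [c + (rest.takeWhile (fun a => decide (a ≤ x + 1))).length]
  | y :: d' => (c + (rest.takeWhile (fun a => decide (a ≤ x + 1))).length) :: groupsFrom 1 y d'
termination_by rest.length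
decreasing_by
  have h1 := List.length_dropWhile_le (fun a => decide (a ≤ x + 1)) rest
  rw [hdw] at h1; simpa using Nat.lt_of_lt_of_le (Nat.lt_succ_self _) h1

def sizes : List Int → List Int
  | [] => []
  | x :: rest => groupsFrom 1 x rest

-- index-free version of A's loop body (for idx ≠ 0)
def gstep (st : List Int × Int × Int) (a : Int) : List Int × Int × Int :=
  if a - st.2.2 ≤ 1 then (st.1, st.2.1 + 1, st.2.2)
  else (st.1 ++ [st.2.1], 1, a)

theorem groupsFrom_nil {x : Int} {rest : List Int} (c : Int)
    (hd : rest.dropWhile (fun a => decide (a ≤ x + 1)) = []) :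
    groupsFrom c x rest = [c + (rest.takeWhile (fun a => decide (a ≤ x + 1))).length] := by
  conv_lhs => rw [groupsFrom.eq_def]
  split <;> simp_all

theorem groupsFrom_cons {x y : Int} {rest d' : List Int} (c : Int)
    (hd : rest.dropWhile (fun a => decide (a ≤ x + 1)) = y :: d') :
    groupsFrom c x rest
      = (c + (rest.takeWhile (fun a => decide (a ≤ x + 1))).length) :: groupsFrom 1 y d' := by
  conv_lhs => rw [groupsFrom.eq_def]
  split <;> simp_all

theorem run_take (t : List Int) : ∀ (h : List Int) (c x : Int), (∀ a ∈ t, a ≤ x + 1) →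
    t.foldl gstep (h, c, x) = (h, c + t.length, x) := by
  induction t with
  | nil => intro h c x _; simp
  | cons a t ih =>
    intro h c x hall
    have ha : a - x ≤ 1 := by have := hall a (by simp); omega
    simp only [List.foldl_cons, gstep, if_pos ha]
    rw [ih h (c + 1) x (fun b hb => hall b (by simp [hb]))]
    simp; ring

theorem afold (n : Nat) : ∀ (rest : List Int), rest.length ≤ n → ∀ (h : List Int) (c x : Int),
    (rest.foldl gstep (h, c, x)).1 ++ [(rest.foldl gstep (h, c, x)).2.1]
      = h ++ groupsFrom c x rest := by
  induction n with
  | zero =>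
    intro rest hlen h c x
    have : rest = [] := List.eq_nil_of_length_eq_zero (Nat.le_zero.mp hlen)
    subst this
    rw [groupsFrom_nil c (by simp)]; simp
  | succ n ih =>
    intro rest hlen h c x
    cases hd : rest.dropWhile (fun a => decide (a ≤ x + 1)) with
    | nil =>
      have hrest : rest.takeWhile (fun a => decide (a ≤ x + 1)) = rest := by
        have := List.takeWhile_append_dropWhile (p := fun a => decide (a ≤ x + 1)) (l := rest)
        rw [hd, List.append_nil] at this; exact this
      have htall : ∀ a ∈ rest, a ≤ x + 1 := by
        intro a ha; rw [← hrest] at ha; simpa using List.mem_takeWhile_imp ha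
      rw [run_take rest h c x htall, groupsFrom_nil c hd, hrest]
    | cons y d' =>
      have hsplit := List.takeWhile_append_dropWhile (p := fun a => decide (a ≤ x + 1)) (l := rest)
      rw [hd] at hsplit
      have htall : ∀ a ∈ rest.takeWhile (fun a => decide (a ≤ x + 1)), a ≤ x + 1 :=
        fun a ha => by simpa using List.mem_takeWhile_imp ha
      have hy : ¬ (y - x ≤ 1) := by
        have hne : rest.dropWhile (fun a => decide (a ≤ x + 1)) ≠ [] := by simp [hd]
        have hhead := List.head_dropWhile_not (fun a => decide (a ≤ x + 1)) hne
        simp only [hd, List.head_cons] at hhead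
        simp at hhead; omega
      have hlen' : d'.length ≤ n := by
        have h1 := List.length_dropWhile_le (fun a => decide (a ≤ x + 1)) rest
        rw [hd] at h1; simp at h1; omega
      conv_lhs => rw [← hsplit]
      rw [List.foldl_append, run_take _ h c x htall]
      simp only [List.foldl_cons, gstep, if_neg hy]
      rw [ih d' hlen' _ 1 y, groupsFrom_cons c hd]
      simp

-- the fold over enumerate with start ≥ 1 never takes the idx = 0 branch: it is the fold of gstep
theorem enum_bridge (rest : List Int) : ∀ (k : Int), 1 ≤ k → ∀ (h : List Int) (c m : Int),
    (PySem.List.enumerate rest k).foldl fstep (h, c, some m)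
      = ((rest.foldl gstep (h, c, m)).1, (rest.foldl gstep (h, c, m)).2.1,
         some (rest.foldl gstep (h, c, m)).2.2) := by
  induction rest with
  | nil => intro k hk h c m; simp [PySem.List.enumerate_nil]
  | cons a rest ih =>
    intro k hk h c m
    rw [PySem.List.enumerate_cons]
    have hk0 : ¬ (k = 0) := by omega
    simp only [List.foldl_cons, fstep, gstep, hk0, if_false, Option.getD_some]
    by_cases hc : a - m ≤ 1
    · simp only [if_pos hc]; exact ih (k + 1) (by omega) h (c + 1) m
    · simp only [if_neg hc]; exact ih (k + 1) (by omega) (h ++ [c]) 1 a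

-- takeWhile facts
theorem tw_getElem {p : Int → Bool} {l : List Int} {k : Nat}
    (hk : k < (l.takeWhile p).length) (hl : k < l.length) : p l[k] = true := by
  have hpre := List.takeWhile_prefix (l := l) p
  have : (l.takeWhile p)[k] = l[k] := List.IsPrefix.getElem hpre hk
  rw [← this]
  exact List.mem_takeWhile_imp (List.getElem_mem hk)

theorem tw_boundary {p : Int → Bool} {l : List Int}
    (hl : (l.takeWhile p).length < l.length) : p (l[(l.takeWhile p).length]'hl) = false := by
  induction l with
  | nil => simp at hl
  | cons a l ih =>
    cases hpa : p a with
    | true =>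
      simp only [List.takeWhile_cons, hpa, if_true, List.length_cons,
        List.getElem_cons_succ] at hl ⊢
      exact ih (by omega)
    | false =>
      simp only [List.takeWhile_cons, hpa]
      exact hpa

theorem drop_tw_length (p : Int → Bool) (l : List Int) :
    l.drop (l.takeWhile p).length = l.dropWhile p := by
  induction l with
  | nil => simp
  | cons a l ih =>
    cases hpa : p a <;> simp [hpa, ih]

-- on a sorted list, bisect_right is the takeWhile length
theorem bisect_eq_tw (s : List Int) (v : Int) (hs : s.Pairwise (· ≤ ·)) :
    PySem.List.bisectRight s v = (s.takeWhile (fun a => decide (a ≤ v))).length := by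
  obtain ⟨hle, hlt, hgt⟩ := PySem.List.bisectRight_spec s v hs
  set j := PySem.List.bisectRight s v with hj
  have htle : (s.takeWhile (fun a => decide (a ≤ v))).length ≤ s.length :=
    List.IsPrefix.length_le (List.takeWhile_prefix _)
  rcases Nat.lt_trichotomy j (s.takeWhile (fun a => decide (a ≤ v))).length with h | h | h
  · have hjlen : j < s.length := lt_of_lt_of_le h htle
    have h1 : s[j] ≤ v := by
      have := tw_getElem (p := fun a => decide (a ≤ v)) (l := s) (k := j) h hjlen
      simpa using this
    have h2 := hgt j hjlen (le_refl j)
    omega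
  · exact h
  · have htlen : (s.takeWhile (fun a => decide (a ≤ v))).length < s.length := lt_of_lt_of_le h hle
    have h1 : ¬ (s[(s.takeWhile (fun a => decide (a ≤ v))).length] ≤ v) := by
      have := tw_boundary (p := fun a => decide (a ≤ v)) (l := s) htlen
      simpa using this
    have h2 := hlt _ htlen h
    omega

-- takeWhile length of a list whose first m elements all satisfy p
theorem tw_len_split (p : Int → Bool) : ∀ (m : Nat) (l : List Int), m ≤ l.length →
    (∀ (k : Nat) (hk : k < l.length), k < m → p l[k] = true) →
    (l.takeWhile p).length = m + ((l.drop m).takeWhile p).length := by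
  intro m
  induction m with
  | zero => intro l _ _; simp
  | succ m ih =>
    intro l hm hall
    cases l with
    | nil => simp at hm
    | cons z zs =>
      have hz : p z = true := hall 0 (by simp) (by omega)
      rw [List.takeWhile_cons_of_pos hz]
      simp only [List.length_cons, List.drop_succ_cons]
      rw [ih zs (by simpa using hm) (fun k hk hkm => by
        have := hall (k + 1) (by simpa using Nat.succ_lt_succ hk) (by omega)
        simpa using this)]
      omega

theorem bloop_inv (s : List Int) (hs : s.Pairwise (· ≤ ·)) :
    ∀ (fuel i : Nat) (best : Int), i ≤ s.length → s.length - i ≤ fuel →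
    bLoop s fuel i best = List.foldl max best (sizes (s.drop i)) := by
  intro fuel
  induction fuel with
  | zero =>
    intro i best hi hfuel
    have : i = s.length := by omega
    subst this
    simp [bLoop, sizes, List.drop_length]
  | succ fuel ih =>
    intro i best hi hfuel
    by_cases hin : i < s.length
    · have hdropi : s.drop i = s[i] :: s.drop (i + 1) := List.drop_eq_getElem_cons hin
      have hget : s.getD i 0 = s[i] := List.getD_eq_getElem s 0 hin
      have hmono : ∀ (p q : Nat) (hp : p < s.length) (hq : q < s.length), p ≤ q → s[p] ≤ s[q] := by
        intro p q hp hq hpq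
        rcases Nat.lt_or_ge p q with h | h
        · exact List.pairwise_iff_getElem.mp hs p q hp hq h
        · have : p = q := by omega
          subst this; exact le_refl _
      have hfirst : ∀ (k : Nat) (hk : k < s.length), k < i + 1 →
          (fun a => decide (a ≤ s[i] + 1)) s[k] = true := by
        intro k hk hki
        have := hmono k i hk hin (by omega)
        simp; omega
      have hj : PySem.List.bisectRight s (s[i] + 1)
          = (i + 1) + ((s.drop (i + 1)).takeWhile (fun a => decide (a ≤ s[i] + 1))).length := by
        rw [bisect_eq_tw s (s[i] + 1) hs]
        exact tw_len_split _ (i + 1) s (by omega) hfirst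
      have htlle : ((s.drop (i + 1)).takeWhile (fun a => decide (a ≤ s[i] + 1))).length
          ≤ (s.drop (i + 1)).length := List.IsPrefix.length_le (List.takeWhile_prefix _)
      have hlen2 : (s.drop (i + 1)).length = s.length - (i + 1) := by simp
      have hdropj :
          s.drop ((i + 1) + ((s.drop (i + 1)).takeWhile (fun a => decide (a ≤ s[i] + 1))).length)
            = (s.drop (i + 1)).dropWhile (fun a => decide (a ≤ s[i] + 1)) := by
        rw [← List.drop_drop, drop_tw_length]
      have hsize : sizes (s.drop i)
          = ((1 : Int) + (((s.drop (i + 1)).takeWhile (fun a => decide (a ≤ s[i] + 1))).length : Int))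
            :: sizes (s.drop ((i + 1) + ((s.drop (i + 1)).takeWhile (fun a => decide (a ≤ s[i] + 1))).length)) := by
        rw [hdropi]
        show groupsFrom 1 s[i] (s.drop (i + 1)) = _
        rw [hdropj]
        cases hd : (s.drop (i + 1)).dropWhile (fun a => decide (a ≤ s[i] + 1)) with
        | nil => rw [groupsFrom_nil 1 hd]; simp [sizes]
        | cons y d' => rw [groupsFrom_cons 1 hd]; simp [sizes]
      show (if i < s.length then
          bLoop s fuel (PySem.List.bisectRight s (s.getD i 0 + 1))
            (max best ((PySem.List.bisectRight s (s.getD i 0 + 1) : Int) - (i : Int)))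
        else best) = _
      rw [if_pos hin, hget, hj]
      rw [ih _ _ (by omega) (by omega)]
      rw [hsize]
      simp only [List.foldl_cons]
      congr 1
      push_cast; omega
    · have : i = s.length := by omega
      subst this
      simp [bLoop, sizes, List.drop_length]

-- every group-size list starts with a nonnegative head when seeded with c ≥ 0
theorem groupsFrom_head (c x : Int) (rest : List Int) (hc : 0 ≤ c) :
    ∃ g0 gs, groupsFrom c x rest = g0 :: gs ∧ 0 ≤ g0 := by
  cases hd : rest.dropWhile (fun a => decide (a ≤ x + 1)) with
  | nil =>
    exact ⟨_, _, groupsFrom_nil c hd, by positivity⟩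
  | cons y d' =>
    exact ⟨_, _, groupsFrom_cons c hd, by positivity⟩

-- ===== VERDICT (by name: the statement is the Claim_ definition above) =====
theorem solution_spec : Claim_equal_solution := by
  intro arr _
  unfold Spec_solution solution solution_alt
  set s := PySem.List.sorted arr (fun k => k) with hsdef
  have hs : s.Pairwise (· ≤ ·) := PySem.List.sorted_pairwise arr (fun k => k)
  rw [bloop_inv s hs s.length 0 0 (by omega) (by omega)]
  simp only [List.drop_zero]
  cases s with
  | nil =>
    simp [PySem.List.enumerate_nil, sizes, PySem.List.max?]
  | cons x rest =>
    rw [PySem.List.enumerate_cons]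
    have h01 : (0 : Int) + 1 = 1 := by norm_num
    simp only [List.foldl_cons, fstep, reduceIte, h01]
    rw [enum_bridge rest 1 (by omega) [] 1 x]
    have hA := afold rest.length rest (le_refl _) [] 1 x
    simp only [List.nil_append] at hA
    rw [hA]
    obtain ⟨g0, gs, hG, hg0⟩ := groupsFrom_head 1 x rest (by omega)
    rw [hG]
    simp only [sizes, hG]
    rw [PySem.List.max?_id_cons]
    simp only [Option.getD_some, List.foldl_cons]
    rw [max_eq_right hg0]
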